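-- pv_equiv track=rewrite | github.com/ayushpatel497/Daily_POTD | Day334_2025/Q334_GFG.py | countSubs
-- ===== SOURCE A (Python) =====
-- def countSubs(s: str) -> int:
--     n = len(s)
--     dp = [0] * (n + 1)
--
--     for i in range(1, n + 1):
--         for j in range(i - 1, 0, -1):
--             cnt = 0
--             t = i
--
--             while j >= 1 and s[t - 1] == s[j - 1]:
--                 cnt += 1
--                 t -= 1
--                 j -= 1
--
--             if cnt > 0:
--                 j += 1
--
--             dp[i] = max(dp[i], cnt)
--
--     ans = 0
--     for i in range(1, n + 1):
--         ans += i - dp[i]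
--
--     return ans
-- ===== SOURCE B (Python) =====
-- def countSubs(s: str) -> int:
--     # O(n^2) DP: row[j] = length of common suffix of s[:i] and s[:j] (lcs-suffix),
--     # computed from the previous row; dp[i] = max over 1 <= j < i.
--     n = len(s)
--     prev = [0] * (n + 1)
--     ans = 0
--     for i in range(1, n + 1):
--         cur = [0] * (n + 1)
--         best = 0
--         for j in range(i - 1, 0, -1):
--             if s[i - 1] == s[j - 1]:
--                 cur[j] = prev[j - 1] + 1
--                 if cur[j] > best:
--                     best = cur[j]
--         prev = cur
--         ans += i - best
--     return ans
-- ===== Notes on version B (the rewrite author's own statement) =====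
-- stated objective: faster
-- what changed: Replaced A's per-pair backwards while-loop scan (restarting a character-by-character suffix match for every j < i) with the classic longest-common-suffix DP that carries one previous row, so each cell is computed in O(1) from prev[j-1].
import Mathlib
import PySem

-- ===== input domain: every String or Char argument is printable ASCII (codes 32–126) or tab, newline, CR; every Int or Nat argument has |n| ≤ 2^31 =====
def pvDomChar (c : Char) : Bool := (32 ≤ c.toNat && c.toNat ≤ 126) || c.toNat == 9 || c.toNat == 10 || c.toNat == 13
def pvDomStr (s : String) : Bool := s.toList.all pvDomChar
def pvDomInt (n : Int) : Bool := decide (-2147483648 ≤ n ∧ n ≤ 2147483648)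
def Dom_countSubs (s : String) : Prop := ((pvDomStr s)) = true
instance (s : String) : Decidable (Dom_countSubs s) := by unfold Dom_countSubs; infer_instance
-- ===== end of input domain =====

-- B replaces A's cubic scan (for each pair i>j a fresh backwards while-loop) by the
-- classic O(n^2) longest-common-suffix DP carrying one previous row; objective: faster.

-- ===== PORT A =====
-- A's inner while-loop: cnt of matching chars walking t,j down while j >= 1.
-- Returned count accumulates the while iterations; indices are always in range on
-- reachable calls (t > j >= 1), getD is exact there.
def pvRunA (l : List Char) (t j : Nat) : Nat :=
  if h : 1 ≤ j ∧ l.getD (t - 1) ' ' = l.getD (j - 1) ' ' then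
    pvRunA l (t - 1) (j - 1) + 1
  else 0
termination_by j
decreasing_by omega

-- A's inner 'for j in range(i-1, 0, -1): dp[i] = max(dp[i], cnt)' loop for one i.
-- (the Python's 'if cnt > 0: j += 1' only touches the loop variable, which the for
-- re-assigns; it has no effect and has no counterpart here)
def pvDpA (l : List Char) (i : Nat) : Nat :=
  (PySem.List.pyRange ((i : Int) - 1) 0 (-1)).foldl
    (fun d j => max d (pvRunA l i j.toNat)) 0

def countSubs (s : String) : Int :=
  let l := s.toList
  let n := l.length
  let dp := (PySem.List.pyRange 1 ((n : Int) + 1) 1).foldl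
    (fun dp i => dp.set i.toNat (pvDpA l i.toNat)) (List.replicate (n + 1) 0)
  (PySem.List.pyRange 1 ((n : Int) + 1) 1).foldl
    (fun ans i => ans + i - ((dp.getD i.toNat 0 : Nat) : Int)) 0

-- ===== PORT B =====
-- One pass over i carrying (prev row, ans); inner loop fills cur from prev and
-- tracks the row maximum best; ans += i - best.
def countSubs_alt (s : String) : Int :=
  let l := s.toList
  let n := l.length
  let r := (PySem.List.pyRange 1 ((n : Int) + 1) 1).foldl
    (fun st i =>
      let cb := (PySem.List.pyRange (i - 1) 0 (-1)).foldl
        (fun cb j =>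
          if l.getD (i.toNat - 1) ' ' = l.getD (j.toNat - 1) ' ' then
            let v := st.1.getD (j.toNat - 1) 0 + 1
            (cb.1.set j.toNat v, if cb.2 < v then v else cb.2)
          else cb)
        (List.replicate (n + 1) 0, 0)
      (cb.1, st.2 + i - ((cb.2 : Nat) : Int)))
    ((List.replicate (n + 1) (0 : Nat), (0 : Int)))
  r.2

-- ===== PRECONDITION & SPEC =====
def Spec_countSubs (s : String) (out : Int) : Prop := out = countSubs_alt s
instance (s : String) (out : Int) : Decidable (Spec_countSubs s out) := by unfold Spec_countSubs; infer_instance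

-- ===== CLAIM (what is proved, stated in full; the proofs are below) =====
def Claim_equal_countSubs : Prop := ∀ (s : String), Dom_countSubs s → Spec_countSubs s (countSubs s)

-- ===== LEMMAS AND PROOFS =====

theorem pv_getD_set (xs : List Nat) (i j v d : Nat) (h : i < xs.length) :
    (xs.set i v).getD j d = if j = i then v else xs.getD j d := by
  unfold List.getD
  by_cases hij : j = i
  · subst hij; rw [List.getElem?_set_self h]; simp
  · rw [List.getElem?_set_ne (by omega)]; simp [hij]


theorem pv_inner_sync (l : List Char) (prev : List Nat) (i : Nat)
    (hprev : ∀ j, j + 1 < i → prev.getD j 0 = pvRunA l (i - 1) j) :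
    ∀ (m : Nat), m < i → ∀ (cur0 : List Nat) (best0 : Nat),
      m < cur0.length → (∀ j, j ≤ m → cur0.getD j 0 = 0) →
      (let r := (PySem.List.pyRange (m : Int) 0 (-1)).foldl
        (fun cb j =>
          if l.getD (i - 1) ' ' = l.getD (j.toNat - 1) ' ' then
            let v := prev.getD (j.toNat - 1) 0 + 1
            (cb.1.set j.toNat v, if cb.2 < v then v else cb.2)
          else cb) (cur0, best0)
       r.2 = (PySem.List.pyRange (m : Int) 0 (-1)).foldl
               (fun d j => max d (pvRunA l i j.toNat)) best0
       ∧ r.1.length = cur0.length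
       ∧ (∀ j, j ≤ m → r.1.getD j 0 = pvRunA l i j)
       ∧ (∀ j, m < j → r.1.getD j 0 = cur0.getD j 0)) := by
  intro m
  induction m with
  | zero =>
    intro _ cur0 best0 _ hz
    rw [PySem.List.pyRange_neg_one_eq_nil (by norm_num)]
    refine ⟨rfl, rfl, ?_, fun j _ => rfl⟩
    intro j hj
    have hj0 : j = 0 := by omega
    rw [hj0, pvRunA, dif_neg (by simp)]
    exact hz 0 le_rfl
  | succ m ih =>
    intro hm cur0 best0 hlen hz
    have hcons : PySem.List.pyRange ((m+1 : Nat) : Int) 0 (-1)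
        = ((m+1 : Nat) : Int) :: PySem.List.pyRange (m : Int) 0 (-1) := by
      rw [PySem.List.pyRange_neg_one_cons (by push_cast; omega)]
      push_cast; norm_num
    rw [hcons]
    simp only [List.foldl_cons]
    have htn : ((m+1 : Nat) : Int).toNat = m + 1 := by omega
    rw [htn]
    simp only [Nat.add_sub_cancel]
    have hrun : pvRunA l i (m+1)
        = if l.getD (i - 1) ' ' = l.getD m ' ' then prev.getD m 0 + 1 else 0 := by
      rw [pvRunA]
      by_cases hc : l.getD (i - 1) ' ' = l.getD (m + 1 - 1) ' '
      · rw [dif_pos ⟨by omega, hc⟩]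
        simp only [Nat.add_sub_cancel] at hc ⊢
        rw [if_pos hc, ← hprev m (by omega)]
      · simp only [Nat.add_sub_cancel] at hc
        rw [dif_neg (by exact fun h => hc h.2), if_neg hc]
    by_cases hc : l.getD (i - 1) ' ' = l.getD m ' '
    · rw [if_pos hc]
      have hv : pvRunA l i (m+1) = prev.getD m 0 + 1 := by rw [hrun, if_pos hc]
      obtain ⟨h1, h2, h3, h4⟩ := ih (by omega) (cur0.set (m+1) (prev.getD m 0 + 1))
        (if best0 < prev.getD m 0 + 1 then prev.getD m 0 + 1 else best0)
        (by rw [List.length_set]; omega)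
        (by
          intro j hj
          rw [pv_getD_set _ _ _ _ _ (by omega), if_neg (by omega)]
          exact hz j (by omega))
      refine ⟨?_, ?_, ?_, ?_⟩
      · rw [h1]
        congr 1
        rw [hv]
        rcases Nat.lt_or_ge best0 (prev.getD m 0 + 1) with h | h
        · rw [if_pos h]; omega
        · rw [if_neg (by omega)]; omega
      · rw [h2, List.length_set]
      · intro j hj
        rcases Nat.lt_or_ge j (m+1) with h | h
        · exact h3 j (by omega)
        · have hj1 : j = m + 1 := by omega
          rw [hj1, h4 (m+1) (by omega), pv_getD_set _ _ _ _ _ (by omega), if_pos rfl, hv]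
      · intro j hj
        rw [h4 j (by omega), pv_getD_set _ _ _ _ _ (by omega), if_neg (by omega)]
    · rw [if_neg hc]
      have hv : pvRunA l i (m+1) = 0 := by rw [hrun, if_neg hc]
      obtain ⟨h1, h2, h3, h4⟩ := ih (by omega) cur0 best0 (by omega) (fun j hj => hz j (by omega))
      refine ⟨?_, h2, ?_, fun j hj => h4 j (by omega)⟩
      · rw [h1]; congr 1; rw [hv]; omega
      · intro j hj
        rcases Nat.lt_or_ge j (m+1) with h | h
        · exact h3 j (by omega)
        · have hj1 : j = m + 1 := by omega
          rw [hj1, h4 (m+1) (by omega), hv]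
          exact hz (m+1) le_rfl

theorem pv_getD_replicate (k j : Nat) : (List.replicate k (0:Nat)).getD j 0 = 0 := by
  unfold List.getD
  rcases Nat.lt_or_ge j k with h | h
  · rw [List.getElem?_replicate, if_pos h]; rfl
  · rw [List.getElem?_eq_none (by simpa using h)]; rfl

theorem pv_outer_sync (l : List Char) : ∀ m, m ≤ l.length →
    (let r := (PySem.List.pyRange 1 ((m : Int) + 1) 1).foldl
      (fun st i =>
        let cb := (PySem.List.pyRange (i - 1) 0 (-1)).foldl
          (fun cb j =>
            if l.getD (i.toNat - 1) ' ' = l.getD (j.toNat - 1) ' ' then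
              let v := st.1.getD (j.toNat - 1) 0 + 1
              (cb.1.set j.toNat v, if cb.2 < v then v else cb.2)
            else cb)
          (List.replicate (l.length + 1) 0, 0)
        (cb.1, st.2 + i - ((cb.2 : Nat) : Int)))
      ((List.replicate (l.length + 1) (0 : Nat), (0 : Int)))
     r.2 = (PySem.List.pyRange 1 ((m : Int) + 1) 1).foldl
             (fun ans i => ans + i - ((pvDpA l i.toNat : Nat) : Int)) 0
     ∧ (∀ j, j + 1 < m + 1 → r.1.getD j 0 = pvRunA l m j)) := by
  intro m
  induction m with
  | zero =>
    intro _
    rw [show ((0:Nat):Int) + 1 = 1 by norm_num, PySem.List.pyRange_one_eq_nil (by norm_num)]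
    exact ⟨rfl, fun j hj => by omega⟩
  | succ m ih =>
    intro hm
    obtain ⟨h1, h2⟩ := ih (by omega)
    have hsplit : PySem.List.pyRange 1 (((m+1 : Nat) : Int) + 1) 1
        = PySem.List.pyRange 1 ((m : Int) + 1) 1 ++ [(m : Int) + 1] := by
      rw [show (((m+1 : Nat) : Int) + 1) = ((m : Int) + 1) + 1 by push_cast; ring]
      exact PySem.List.pyRange_one_succ_right (by omega)
    rw [hsplit]
    simp only [List.foldl_append, List.foldl_cons, List.foldl_nil]
    have ht1 : ((m : Int) + 1).toNat = m + 1 := by omega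
    have ht2 : ((m : Int) + 1) - 1 = (m : Int) := by ring
    simp only [ht1, ht2]
    obtain ⟨g1, g2, g3, g4⟩ := pv_inner_sync l _ (m+1) (fun j hj => h2 j (by omega)) m
      (by omega) (List.replicate (l.length + 1) 0) 0 (by simp; omega)
      (fun j hj => pv_getD_replicate _ _)
    constructor
    · simp only [Nat.add_sub_cancel] at g1 ⊢
      rw [g1, h1]
      congr 1
      unfold pvDpA
      rw [show ((m+1 : Nat) : Int) - 1 = (m : Int) by push_cast; ring]
    · intro j hj
      simp only [Nat.add_sub_cancel] at g3 ⊢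
      exact g3 j (by omega)

theorem pv_dpA_arr (l : List Char) : ∀ m, m ≤ l.length →
    (let dp := (PySem.List.pyRange 1 ((m : Int) + 1) 1).foldl
      (fun dp i => dp.set i.toNat (pvDpA l i.toNat)) (List.replicate (l.length + 1) 0)
     dp.length = l.length + 1
     ∧ ∀ j, dp.getD j 0 = if 1 ≤ j ∧ j ≤ m then pvDpA l j else 0) := by
  intro m
  induction m with
  | zero =>
    intro _
    rw [show ((0:Nat):Int) + 1 = 1 by norm_num, PySem.List.pyRange_one_eq_nil (by norm_num)]
    refine ⟨by simp, fun j => ?_⟩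
    rw [if_neg (by omega)]
    exact pv_getD_replicate _ _
  | succ m ih =>
    intro hm
    obtain ⟨h1, h2⟩ := ih (by omega)
    have hsplit : PySem.List.pyRange 1 (((m+1 : Nat) : Int) + 1) 1
        = PySem.List.pyRange 1 ((m : Int) + 1) 1 ++ [(m : Int) + 1] := by
      rw [show (((m+1 : Nat) : Int) + 1) = ((m : Int) + 1) + 1 by push_cast; ring]
      exact PySem.List.pyRange_one_succ_right (by omega)
    rw [hsplit]
    simp only [List.foldl_append, List.foldl_cons, List.foldl_nil]
    have ht1 : ((m : Int) + 1).toNat = m + 1 := by omega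
    simp only [ht1]
    refine ⟨by rw [List.length_set]; exact h1, fun j => ?_⟩
    rw [pv_getD_set _ _ _ _ _ (by omega)]
    rcases Nat.lt_or_ge j (m+1) with h | h
    · rw [if_neg (by omega), h2 j]
      by_cases hj1 : 1 ≤ j ∧ j ≤ m
      · rw [if_pos hj1, if_pos (by omega)]
      · rw [if_neg hj1, if_neg (by omega)]
    · rcases Nat.lt_or_ge (m+1) j with h' | h'
      · rw [if_neg (by omega), h2 j, if_neg (by omega), if_neg (by omega)]
      · rw [if_pos (by omega), if_pos (by omega)]
        congr 1
        omega


-- ===== VERDICT (by name: the statement is the Claim_ definition above) =====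
theorem countSubs_spec : Claim_equal_countSubs := by
  intro s _
  unfold Spec_countSubs countSubs countSubs_alt
  simp only []
  obtain ⟨hlen, hget⟩ := pv_dpA_arr s.toList s.toList.length le_rfl
  obtain ⟨hB, _⟩ := pv_outer_sync s.toList s.toList.length le_rfl
  rw [hB]
  refine PySem.List.foldl_congr_mem _ _ _ _ ?_
  intro acc i hi
  rw [PySem.List.mem_pyRange_one] at hi
  rw [hget i.toNat, if_pos (by omega)]
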